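-- pv_equiv track=rewrite | github.com/liamcarroll/CA117 | Lab_3.1/wordcomps_031.py | anagram_angle
-- ===== SOURCE A (Python) =====
-- def anagram_angle(s):
--     if len(s) != len('angle') or s == 'angle':
--         return False
--     else:
--         for c in 'angle':
--             if not c in s:
--                 return False
--         return True
-- ===== SOURCE B (Python) =====
-- def anagram_angle(s):
--     return s != 'angle' and sorted(s) == sorted('angle')
-- ===== Notes on version B (the rewrite author's own statement) =====
-- stated objective: idiomatic
-- what changed: Replaces the per-letter membership loop (with its separate length test) by a single sorted-multiset comparison, keeping the exclusion of the target word itself; the length check becomes implicit in the sorted equality.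
import Mathlib
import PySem

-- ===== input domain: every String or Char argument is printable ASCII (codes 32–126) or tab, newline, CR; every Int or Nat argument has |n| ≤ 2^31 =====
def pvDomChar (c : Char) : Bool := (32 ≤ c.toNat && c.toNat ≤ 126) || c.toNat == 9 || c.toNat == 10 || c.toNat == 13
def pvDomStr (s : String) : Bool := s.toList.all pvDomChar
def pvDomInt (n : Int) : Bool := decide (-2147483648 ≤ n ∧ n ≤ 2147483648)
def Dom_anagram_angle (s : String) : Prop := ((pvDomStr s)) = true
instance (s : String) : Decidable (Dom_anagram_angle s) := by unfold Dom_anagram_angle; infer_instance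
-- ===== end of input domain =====

-- B replaces A's per-letter membership loop by one sorted-multiset comparison (idiomatic; same cost class).

-- ===== PORT A =====
-- 'c in s' for a single character c is membership of c among s's characters.
def anagram_angle (s : String) : Bool :=
  if PySem.Str.len s ≠ 5 ∨ s = "angle" then false
  else "angle".toList.all (fun c => s.toList.contains c)

-- ===== PORT B =====
def anagram_angle_alt (s : String) : Bool :=
  s ≠ "angle" ∧
    PySem.List.sorted s.toList (fun x => x) = PySem.List.sorted "angle".toList (fun x => x)

-- ===== PRECONDITION & SPEC =====
def Spec_anagram_angle (s : String) (out : Bool) : Prop := out = anagram_angle_alt s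
instance (s : String) (out : Bool) : Decidable (Spec_anagram_angle s out) := by unfold Spec_anagram_angle; infer_instance

-- ===== CLAIM (what is proved, stated in full; the proofs are below) =====
def Claim_equal_anagram_angle : Prop := ∀ (s : String), Dom_anagram_angle s → Spec_anagram_angle s (anagram_angle s)

-- ===== LEMMAS AND PROOFS =====

-- Since 'angle' has 5 distinct letters, a length-5 list containing all of them is a permutation of it.
lemma perm_angle_iff (l : List Char) :
    (l.length = 5 ∧ ∀ c ∈ "angle".toList, c ∈ l) ↔ l.Perm "angle".toList := by
  constructor
  · rintro ⟨hlen, hmem⟩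
    have hnd : ("angle".toList).Nodup := by decide
    have hsub : "angle".toList ⊆ l := fun c hc => hmem c hc
    have hsp : List.Subperm "angle".toList l := hnd.subperm hsub
    have hlen' : l.length ≤ ("angle".toList).length := by
      simp only [hlen]; decide
    exact (hsp.perm_of_length_le hlen').symm
  · intro hp
    exact ⟨by simpa using hp.length_eq, fun c hc => (hp.mem_iff).mpr hc⟩

-- ===== VERDICT (by name: the statement is the Claim_ definition above) =====
theorem anagram_angle_spec : Claim_equal_anagram_angle := by
  intro s _
  unfold Spec_anagram_angle anagram_angle anagram_angle_alt
  rw [Bool.eq_iff_iff]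
  have hlen := PySem.Str.len_eq s
  constructor
  · intro h
    split_ifs at h with hcond
    obtain ⟨h5, hne⟩ := not_or.mp hcond
    have h5' : PySem.Str.len s = 5 := not_not.mp h5
    have hl : s.toList.length = 5 := by omega
    have hperm : s.toList.Perm "angle".toList := by
      refine (perm_angle_iff s.toList).mp ⟨hl, fun c hc => ?_⟩
      have := List.all_eq_true.mp h c hc
      simpa [List.contains_iff_mem] using this
    simp only [decide_eq_true_eq]
    exact ⟨hne, (PySem.List.sorted_id_eq_sorted_id_iff_perm _ _).mpr hperm⟩
  · intro h
    simp only [decide_eq_true_eq,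
      PySem.List.sorted_id_eq_sorted_id_iff_perm] at h
    obtain ⟨hne, hperm⟩ := h
    have hne' : s ≠ "angle" := by simpa using hne
    obtain ⟨hl, hmem⟩ := (perm_angle_iff s.toList).mpr hperm
    have h5 : PySem.Str.len s = 5 := by omega
    rw [if_neg (not_or.mpr ⟨not_not.mpr h5, hne'⟩)]
    simp only [List.all_eq_true, List.contains_iff_mem]
    exact fun c hc => hmem c hc
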